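-- pv_equiv track=rewrite | github.com/alok/ACL2Lean | scripts/acl2_hint_bridge.py | collect_prefixed_blocks
-- ===== SOURCE A (Python) =====
-- def collect_prefixed_blocks(lines: list[str], prefix: str) -> list[str]:
--     blocks: list[str] = []
--     i = 0
--     while i < len(lines):
--         if lines[i].startswith(prefix):
--             block = [lines[i].rstrip()]
--             j = i + 1
--             while j < len(lines) and lines[j].strip():
--                 block.append(lines[j].rstrip())
--                 j += 1
--             blocks.append("\n".join(block).strip())
--             i = j
--         i += 1
--     return blocks
-- ===== SOURCE B (Python) =====
-- def collect_prefixed_blocks(lines: list[str], prefix: str) -> list[str]: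
--     blocks: list[str] = []
--     block: list[str] = []
--     in_block = False
--     for line in lines:
--         if in_block:
--             if line.strip():
--                 block.append(line.rstrip())
--             else:
--                 blocks.append("\n".join(block).strip())
--                 in_block = False
--         elif line.startswith(prefix):
--             block = [line.rstrip()]
--             in_block = True
--     if in_block:
--         blocks.append("\n".join(block).strip())
--     return blocks
-- ===== Notes on version B (the rewrite author's own statement) =====
-- stated objective: simpler
-- what changed: Replaced the nested index-based while loops (inner scan plus i=j index jumping) with a single flat pass over the lines maintaining an in_block flag and current block, flushed on blank lines and at end of input.
import Mathlib
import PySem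

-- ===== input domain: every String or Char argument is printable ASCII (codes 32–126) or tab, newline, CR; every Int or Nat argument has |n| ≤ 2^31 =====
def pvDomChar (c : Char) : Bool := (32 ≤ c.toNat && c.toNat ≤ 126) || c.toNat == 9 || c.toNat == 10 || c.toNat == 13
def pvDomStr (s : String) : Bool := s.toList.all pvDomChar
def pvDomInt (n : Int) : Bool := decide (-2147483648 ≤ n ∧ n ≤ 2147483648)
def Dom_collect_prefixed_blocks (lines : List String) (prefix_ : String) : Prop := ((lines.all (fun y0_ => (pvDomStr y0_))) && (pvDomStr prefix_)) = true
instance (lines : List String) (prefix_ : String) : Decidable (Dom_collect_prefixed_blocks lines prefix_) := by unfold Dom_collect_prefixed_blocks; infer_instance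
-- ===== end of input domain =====

-- B replaces A's nested index-based while loops with one flat pass keeping an in-block flag (simpler decomposition, same cost).

-- ===== PORT A =====
-- inner while loop: while j < len(lines) and lines[j].strip(): block.append(lines[j].rstrip()); j += 1
def pvInnerA (lines : List String) (j : Nat) (block : List String) : Nat × List String :=
  if h : j < lines.length ∧ PySem.Str.strip (lines[j]!) ≠ "" then
    pvInnerA lines (j + 1) (block ++ [PySem.Str.rstrip (lines[j]!)])
  else (j, block)
termination_by lines.length - j
decreasing_by omega

-- the port's outer loop needs j ≥ its start index for termination
theorem pvInnerA_ge (lines : List String) (j : Nat) (block : List String) :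
    j ≤ (pvInnerA lines j block).1 := by
  induction j, block using pvInnerA.induct lines with
  | case1 j block h ih => rw [pvInnerA, dif_pos h]; omega
  | case2 j block h => rw [pvInnerA, dif_neg h]

-- outer while loop over index i, accumulator blocks; on a prefix match it runs the
-- inner loop from i+1, appends the joined stripped block and resumes at j+1
def pvOuterA (lines : List String) (prefix_ : String) (i : Nat) (blocks : List String) : List String :=
  if h : i < lines.length then
    if PySem.Str.startswith (lines[i]!) prefix_ then
      pvOuterA lines prefix_ ((pvInnerA lines (i + 1) [PySem.Str.rstrip (lines[i]!)]).1 + 1)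
        (blocks ++ [PySem.Str.strip (PySem.Str.join "\n" (pvInnerA lines (i + 1) [PySem.Str.rstrip (lines[i]!)]).2)])
    else pvOuterA lines prefix_ (i + 1) blocks
  else blocks
termination_by lines.length - i
decreasing_by
  · have := pvInnerA_ge lines (i + 1) [PySem.Str.rstrip (lines[i]!)]; omega
  · omega

def collect_prefixed_blocks (lines : List String) (prefix_ : String) : List String :=
  pvOuterA lines prefix_ 0 []

-- ===== PORT B =====
-- single flat pass: state = in-block flag, current block, results so far
def pvLoopB (prefix_ : String) : List String → Bool → List String → List String → List String
  | [], inb, block, blocks =>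
      if inb then blocks ++ [PySem.Str.strip (PySem.Str.join "\n" block)] else blocks
  | l :: rest, inb, block, blocks =>
      if inb then
        if PySem.Str.strip l ≠ "" then
          pvLoopB prefix_ rest true (block ++ [PySem.Str.rstrip l]) blocks
        else
          pvLoopB prefix_ rest false [] (blocks ++ [PySem.Str.strip (PySem.Str.join "\n" block)])
      else
        if PySem.Str.startswith l prefix_ then
          pvLoopB prefix_ rest true [PySem.Str.rstrip l] blocks
        else
          pvLoopB prefix_ rest false block blocks

def collect_prefixed_blocks_alt (lines : List String) (prefix_ : String) : List String :=
  pvLoopB prefix_ lines false [] []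

-- ===== PRECONDITION & SPEC =====
def Spec_collect_prefixed_blocks (lines : List String) (prefix_ : String) (out : List String) : Prop := out = collect_prefixed_blocks_alt lines prefix_
instance (lines : List String) (prefix_ : String) (out : List String) : Decidable (Spec_collect_prefixed_blocks lines prefix_ out) := by unfold Spec_collect_prefixed_blocks; infer_instance

-- ===== CLAIM (what is proved, stated in full; the proofs are below) =====
def Claim_equal_collect_prefixed_blocks : Prop := ∀ (lines : List String) (prefix_ : String), Dom_collect_prefixed_blocks lines prefix_ → Spec_collect_prefixed_blocks lines prefix_ (collect_prefixed_blocks lines prefix_)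

-- ===== LEMMAS AND PROOFS =====

theorem pvDrop_cons (lines : List String) (i : Nat) (h : i < lines.length) :
    lines.drop i = lines[i]! :: lines.drop (i + 1) := by
  rw [List.getElem!_eq_getElem?_getD, List.getElem?_eq_getElem h]
  exact List.drop_eq_getElem_cons h

-- while in a block, B's flat loop tracks A's inner loop and then closes the block
theorem pvLoopB_inner (prefix_ : String) (lines : List String) (j : Nat) (block blocks : List String) :
    pvLoopB prefix_ (lines.drop j) true block blocks =
      pvLoopB prefix_ (lines.drop ((pvInnerA lines j block).1 + 1)) false []
        (blocks ++ [PySem.Str.strip (PySem.Str.join "\n" (pvInnerA lines j block).2)]) := by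
  induction j, block using pvInnerA.induct lines generalizing blocks with
  | case1 j block h ih =>
      rw [pvDrop_cons lines j h.1, pvInnerA, dif_pos h]
      show (if PySem.Str.strip (lines[j]!) ≠ "" then _ else _) = _
      rw [if_pos h.2]
      exact ih blocks
  | case2 j block h =>
      rw [pvInnerA, dif_neg h]
      by_cases hj : j < lines.length
      · have hs : PySem.Str.strip (lines[j]!) = "" := by
          by_contra hc; exact h ⟨hj, hc⟩
        rw [pvDrop_cons lines j hj]
        show (if PySem.Str.strip (lines[j]!) ≠ "" then _ else _) = _
        rw [if_neg (not_not.mpr hs)]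
      · rw [List.drop_eq_nil_of_le (by omega),
            List.drop_eq_nil_of_le (show lines.length ≤ j + 1 by omega)]
        simp [pvLoopB]

-- B's flat loop, out of a block, tracks A's outer loop
theorem pvLoopB_outer (lines : List String) (prefix_ : String) (i : Nat) (blocks : List String) :
    pvOuterA lines prefix_ i blocks = pvLoopB prefix_ (lines.drop i) false [] blocks := by
  induction i, blocks using pvOuterA.induct lines prefix_ with
  | case1 i blocks h hs ih =>
      rw [pvOuterA, dif_pos h, if_pos hs, pvDrop_cons lines i h]
      show _ = (if PySem.Str.startswith (lines[i]!) prefix_ = true then _ else _)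
      rw [if_pos hs, pvLoopB_inner prefix_ lines (i + 1) [PySem.Str.rstrip (lines[i]!)] blocks]
      exact ih
  | case2 i blocks h hs ih =>
      rw [pvOuterA, dif_pos h, if_neg hs, pvDrop_cons lines i h]
      show _ = (if PySem.Str.startswith (lines[i]!) prefix_ = true then _ else _)
      rw [if_neg hs]
      exact ih
  | case3 i blocks h =>
      rw [pvOuterA, dif_neg h, List.drop_eq_nil_of_le (by omega)]
      simp [pvLoopB]

-- ===== VERDICT (by name: the statement is the Claim_ definition above) =====
theorem collect_prefixed_blocks_spec : Claim_equal_collect_prefixed_blocks := by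
  intro lines prefix_ _
  unfold Spec_collect_prefixed_blocks collect_prefixed_blocks collect_prefixed_blocks_alt
  exact pvLoopB_outer lines prefix_ 0 []
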